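-- pv_equiv track=rewrite | github.com/leduyhien20003/personal_code | code-thuật toán antt/bai22.py | result
-- ===== SOURCE A (Python) =====
-- import math
--
-- def is_prime(number):
--     if number < 2:
--         return False
--     elif number == 2:
--         return True
--     elif number % 2 == 0:
--         return False
--     else:
--         for i in range(2, int(math.sqrt(number) + 1)):
--             if number % i == 0:
--                 return False
--     return True
--
-- def result(number_l, number_r):
--     sum = 0
--     for i in range(number_l, number_r):
--         if is_prime(i):
--             Fi = i
--         else:
--             Fi = 0
--         for j in range(i + 1, number_r + 1):
--             if is_prime(j):
--                 Fj = j
--             else: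
--                 Fj = 0
--             sum += (Fi * Fj)
--     return sum
-- ===== SOURCE B (Python) =====
-- # B: one pass over [l, r] summing the primes T and their squares Q;
-- # the answer is (T*T - Q) // 2 by the pairwise-product identity.
-- import math
--
-- def _is_prime(n):
--     if n < 2:
--         return False
--     for d in range(2, math.isqrt(n) + 1):
--         if n % d == 0:
--             return False
--     return True
--
-- def result(number_l, number_r):
--     t = 0
--     q = 0
--     for n in range(number_l, number_r + 1):
--         if _is_prime(n):
--             t += n
--             q += n * n
--     return (t * t - q) // 2
-- ===== Notes on version B (the rewrite author's own statement) =====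
-- stated objective: alternative
-- what changed: Replaces A's double loop over all ordered pairs with a single pass summing the primes T and their squares Q over [l,r], returning (T*T-Q)//2 by the pairwise-product identity.
import Mathlib
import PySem

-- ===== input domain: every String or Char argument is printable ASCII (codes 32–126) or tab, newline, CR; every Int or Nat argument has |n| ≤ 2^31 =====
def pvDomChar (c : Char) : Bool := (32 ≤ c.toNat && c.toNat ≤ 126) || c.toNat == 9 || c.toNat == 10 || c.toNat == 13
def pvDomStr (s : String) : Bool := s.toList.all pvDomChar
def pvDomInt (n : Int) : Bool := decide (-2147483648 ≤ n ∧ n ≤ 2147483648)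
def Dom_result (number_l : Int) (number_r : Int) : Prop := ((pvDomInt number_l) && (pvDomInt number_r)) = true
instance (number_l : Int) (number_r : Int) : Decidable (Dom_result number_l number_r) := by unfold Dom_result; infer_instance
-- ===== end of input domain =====

-- B replaces A's double loop over pairs by a single pass computing T = sum of primes and
-- Q = sum of their squares on [l, r], returning (T*T - Q) // 2 (objective: alternative algorithm).

-- ===== PORT A =====
-- int(math.sqrt(n) + 1): for 2 < n ≤ 2^31 the double sqrt is exact enough that this equals isqrt(n)+1.
def isPrimeA (n : Int) : Bool :=
  if n < 2 then false
  else if n = 2 then true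
  else if PySem.Int.mod n 2 = 0 then false
  else (PySem.List.pyRange 2 ((Nat.sqrt n.toNat : Int) + 1) 1).all
        (fun i => !(PySem.Int.mod n i = 0))

def result (number_l : Int) (number_r : Int) : Int :=
  (PySem.List.pyRange number_l number_r 1).foldl
    (fun s i =>
      let Fi : Int := if isPrimeA i then i else 0
      (PySem.List.pyRange (i + 1) (number_r + 1) 1).foldl
        (fun s j =>
          let Fj : Int := if isPrimeA j then j else 0
          s + Fi * Fj) s)
    0

-- ===== PORT B =====
def isPrimeB (n : Int) : Bool :=
  if n < 2 then false
  else (PySem.List.pyRange 2 ((Nat.sqrt n.toNat : Int) + 1) 1).all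
        (fun d => !(PySem.Int.mod n d = 0))

def result_alt (number_l : Int) (number_r : Int) : Int :=
  let tq : Int × Int :=
    (PySem.List.pyRange number_l (number_r + 1) 1).foldl
      (fun tq n => if isPrimeB n then (tq.1 + n, tq.2 + n * n) else tq)
      (0, 0)
  PySem.Int.floordiv (tq.1 * tq.1 - tq.2) 2

-- ===== PRECONDITION & SPEC =====
def Spec_result (number_l : Int) (number_r : Int) (out : Int) : Prop := out = result_alt number_l number_r
instance (number_l : Int) (number_r : Int) (out : Int) : Decidable (Spec_result number_l number_r out) := by unfold Spec_result; infer_instance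

-- ===== CLAIM (what is proved, stated in full; the proofs are below) =====
def Claim_equal_result : Prop := ∀ (number_l : Int) (number_r : Int), Dom_result number_l number_r → Spec_result number_l number_r (result number_l number_r)

-- ===== LEMMAS AND PROOFS =====

-- the common "prime contribution" function
def pvF (n : Int) : Int := if isPrimeB n then n else 0

-- recursive characterisations of the sums over [l, r]
def pvT (l r : Int) : Int := if l ≤ r then pvF l + pvT (l + 1) r else 0
  termination_by (r + 1 - l).toNat
  decreasing_by all_goals omega

def pvQ (l r : Int) : Int := if l ≤ r then pvF l * pvF l + pvQ (l + 1) r else 0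
  termination_by (r + 1 - l).toNat
  decreasing_by all_goals omega

lemma isPrime_eq (n : Int) : isPrimeA n = isPrimeB n := by
  unfold isPrimeA isPrimeB
  by_cases h2 : n < 2
  · simp [h2]
  · simp only [if_neg h2]
    by_cases he : n = 2
    · subst he
      simp [PySem.List.pyRange_one_eq_nil]
    · rw [if_neg he]
      by_cases hm : PySem.Int.mod n 2 = 0
      · -- n even, n ≥ 4: 2 is in the trial range of B and divides n
        rw [if_pos hm]
        have hdvd : (2 : Int) ∣ n := (PySem.Int.mod_eq_zero_iff_dvd n 2).mp hm
        have h4 : 4 ≤ n := by omega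
        have hs : 2 ≤ Nat.sqrt n.toNat := by
          rw [Nat.le_sqrt]
          omega
        have hsi : (2 : Int) ≤ (Nat.sqrt n.toNat : Int) := by exact_mod_cast hs
        have hmem : (2 : Int) ∈ PySem.List.pyRange 2 ((Nat.sqrt n.toNat : Int) + 1) 1 := by
          rw [PySem.List.mem_pyRange_one]
          omega
        symm
        rw [List.all_eq_false]
        exact ⟨2, hmem, by simp [hdvd]⟩
      · rw [if_neg hm]

lemma pyF_eqA (n : Int) : (if isPrimeA n then n else 0) = pvF n := by
  rw [isPrime_eq]; rfl

-- B's fold computes (T, Q)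
lemma bfold (l r : Int) (t q : Int) :
    (PySem.List.pyRange l (r + 1) 1).foldl
      (fun tq n => if isPrimeB n then (tq.1 + n, tq.2 + n * n) else tq) (t, q)
    = (t + pvT l r, q + pvQ l r) := by
  by_cases h : l ≤ r
  · rw [PySem.List.pyRange_one_cons (by omega)]
    simp only [List.foldl_cons]
    have hT : pvT l r = pvF l + pvT (l + 1) r := by rw [pvT, if_pos h]
    have hQ : pvQ l r = pvF l * pvF l + pvQ (l + 1) r := by rw [pvQ, if_pos h]
    by_cases hp : isPrimeB l
    · rw [if_pos hp, bfold (l + 1) r, hT, hQ]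
      simp [pvF, hp]
      constructor <;> ring
    · rw [if_neg hp, bfold (l + 1) r, hT, hQ]
      simp [pvF, hp]
  · rw [PySem.List.pyRange_one_eq_nil (by omega)]
    rw [pvT, pvQ, if_neg h, if_neg h]
    simp
  termination_by (r + 1 - l).toNat
  decreasing_by all_goals omega

-- A's inner loop adds Fi * T(i+1, r)
lemma afold_inner (c r : Int) (l : Int) (s : Int) :
    (PySem.List.pyRange l (r + 1) 1).foldl
      (fun s j => s + c * (if isPrimeA j then j else 0)) s
    = s + c * pvT l r := by
  by_cases h : l ≤ r
  · rw [PySem.List.pyRange_one_cons (by omega)]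
    simp only [List.foldl_cons]
    rw [afold_inner c r (l + 1), pyF_eqA]
    conv_rhs => rw [pvT, if_pos h]
    ring
  · rw [PySem.List.pyRange_one_eq_nil (by omega)]
    rw [pvT, if_neg h]
    simp
  termination_by (r + 1 - l).toNat
  decreasing_by all_goals omega

-- recursive form of A's outer loop
def pvS (l r : Int) : Int := if l < r then pvF l * pvT (l + 1) r + pvS (l + 1) r else 0
  termination_by (r - l).toNat
  decreasing_by all_goals omega

lemma afold_outer (r : Int) (l : Int) (s : Int) :
    (PySem.List.pyRange l r 1).foldl
      (fun s i =>
        (PySem.List.pyRange (i + 1) (r + 1) 1).foldl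
          (fun s j => s + (if isPrimeA i then i else 0) * (if isPrimeA j then j else 0)) s) s
    = s + pvS l r := by
  by_cases h : l < r
  · rw [PySem.List.pyRange_one_cons h]
    simp only [List.foldl_cons]
    rw [afold_inner _ r (l + 1), afold_outer r (l + 1), pyF_eqA]
    conv_rhs => rw [pvS, if_pos h]
    ring
  · rw [PySem.List.pyRange_one_eq_nil (by omega)]
    rw [pvS, if_neg h]
    simp
  termination_by (r - l).toNat
  decreasing_by all_goals omega

-- the pairwise-product identity: 2 * S = T^2 - Q
lemma key (l r : Int) : 2 * pvS l r = pvT l r * pvT l r - pvQ l r := by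
  by_cases h : l < r
  · have ih := key (l + 1) r
    have hS : pvS l r = pvF l * pvT (l + 1) r + pvS (l + 1) r := by
      rw [pvS, if_pos h]
    have hT : pvT l r = pvF l + pvT (l + 1) r := by
      rw [pvT, if_pos (by omega)]
    have hQ : pvQ l r = pvF l * pvF l + pvQ (l + 1) r := by
      rw [pvQ, if_pos (by omega)]
    rw [hS, hT, hQ]
    nlinarith [ih]
  · rw [pvS, if_neg h]
    by_cases he : l ≤ r
    · have : l = r := by omega
      subst this
      rw [pvT, if_pos le_rfl, pvQ, if_pos le_rfl,
          pvT, if_neg (by omega), pvQ, if_neg (by omega)]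
      ring
    · rw [pvT, if_neg he, pvQ, if_neg he]; ring
  termination_by (r - l).toNat
  decreasing_by all_goals omega

-- ===== VERDICT (by name: the statement is the Claim_ definition above) =====
theorem result_spec : Claim_equal_result := by
  intro l r _
  show result l r = result_alt l r
  unfold result result_alt
  rw [bfold l r 0 0]
  simp only [zero_add]
  have ho := afold_outer r l 0
  simp only [zero_add] at ho
  rw [ho]
  have hk := key l r
  have h2 : pvT l r * pvT l r - pvQ l r = pvS l r * 2 := by omega
  rw [h2, PySem.Int.floordiv_eq_ediv_of_pos (by omega)]
  simp
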